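-- pv_equiv track=rewrite | github.com/hellow0rld3/dsa-exams | 2022/exam-2/coal.py | coal
-- ===== SOURCE A (Python) =====
-- def coal( A, T ):
--     n = len(A)
--     magazyny = [T for _ in range(n)]
--     idx = [-1 for _ in range(n)]
--     for i in range(n):
--         for j in range(n):
--             if magazyny[j] >= A[i]:
--                 magazyny[j] -= A[i]
--                 idx[i] = j
--                 break
--
--     return idx[-1]
-- ===== SOURCE B (Python) =====
-- def coal(A, T):
--     # Segment tree of remaining capacities: leftmost-fit descent + point update, O(n log n).
--     n = len(A)
--
--     def build(k):  # tree over k warehouses, all with capacity T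
--         if k <= 1:
--             return [T]                      # leaf: [capacity]
--         lk = k // 2
--         l = build(lk)
--         r = build(k - lk)
--         return [max(l[0], r[0]), l, r, lk]  # node: [max, left, right, left-leaf-count]
--
--     def alloc(t, x):  # place x at leftmost leaf with capacity >= x; return its index or -1
--         if len(t) == 1:
--             if t[0] >= x:
--                 t[0] -= x
--                 return 0
--             return -1
--         if t[1][0] >= x:
--             j = alloc(t[1], x)
--         else:
--             j = alloc(t[2], x)
--             if j != -1:
--                 j += t[3]
--         t[0] = max(t[1][0], t[2][0])
--         return j
--
--     root = build(n)
--     last = -1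
--     for x in A:
--         last = alloc(root, x)
--     return last
-- ===== Notes on version B (the rewrite author's own statement) =====
-- stated objective: faster
-- what changed: Replaced A's inner linear scan of all warehouses per item by a segment tree of remaining capacities (leftmost-index-with-capacity>=x descent plus point update).
import Mathlib
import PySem

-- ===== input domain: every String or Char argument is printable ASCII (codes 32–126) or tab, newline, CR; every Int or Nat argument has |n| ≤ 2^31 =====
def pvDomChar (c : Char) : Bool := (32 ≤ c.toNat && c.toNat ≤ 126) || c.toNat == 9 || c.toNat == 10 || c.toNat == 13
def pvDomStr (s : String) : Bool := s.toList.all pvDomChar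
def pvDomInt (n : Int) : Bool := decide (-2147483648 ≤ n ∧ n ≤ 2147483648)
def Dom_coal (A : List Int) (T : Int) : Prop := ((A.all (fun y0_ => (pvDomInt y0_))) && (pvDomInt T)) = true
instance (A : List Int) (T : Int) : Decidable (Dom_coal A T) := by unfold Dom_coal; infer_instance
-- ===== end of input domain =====

-- B replaces A's quadratic inner first-fit scan by a segment tree of remaining
-- capacities (leftmost-fit descent + point update), O(n log n); A mutates its
-- local lists only, so no observable side effects are involved.

-- ===== PORT A =====
-- A's inner `for j in range(n): if magazyny[j] >= A[i]: magazyny[j] -= A[i]; idx[i] = j; break`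
-- transcribed as the obvious structural recursion over magazyny (same scan, same in-place update).
def firstFitA : List Int → Int → List Int × Int
  | [], _ => ([], -1)
  | m :: rest, x =>
    if m ≥ x then ((m - x) :: rest, 0)
    else
      let p := firstFitA rest x
      (m :: p.1, if p.2 = -1 then -1 else p.2 + 1)

def stepA (st : List Int × List Int) (a : Int) : List Int × List Int :=
  let p := firstFitA st.1 a
  (p.1, st.2 ++ [p.2])

def coal (A : List Int) (T : Int) : Int :=
  let n := A.length
  let idx := (A.foldl stepA (List.replicate n T, [])).2
  (PySem.List.pyGet? idx (-1)).getD 0   -- idx[-1]; none (IndexError, A = []) is excluded by Pre_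

-- ===== PORT B =====
inductive STree where
  | leaf : Int → STree
  | node : Int → STree → STree → Nat → STree

def maxOf : STree → Int
  | .leaf v => v
  | .node m _ _ _ => m

def buildT (T : Int) : Nat → STree
  | 0 => .leaf T
  | 1 => .leaf T
  | (k+2) =>
    let lk := (k+2)/2
    let l := buildT T lk
    let r := buildT T (k+2-lk)
    .node (max (maxOf l) (maxOf r)) l r lk
termination_by k => k
decreasing_by all_goals omega

def allocT : STree → Int → Int × STree
  | .leaf v, x => if v ≥ x then (0, .leaf (v - x)) else (-1, .leaf v)
  | .node _ l r lk, x =>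
    if maxOf l ≥ x then
      let p := allocT l x
      (p.1, .node (max (maxOf p.2) (maxOf r)) p.2 r lk)
    else
      let p := allocT r x
      ((if p.1 = -1 then -1 else p.1 + (lk : Int)), .node (max (maxOf l) (maxOf p.2)) l p.2 lk)

def stepB (st : Int × STree) (x : Int) : Int × STree := allocT st.2 x

def coal_alt (A : List Int) (T : Int) : Int :=
  (A.foldl stepB (-1, buildT T A.length)).1

-- ===== PRECONDITION & SPEC =====
-- Pre_ excludes only the empty list, on which A raises IndexError (idx[-1] on []).
def Pre_coal (A : List Int) (T : Int) : Prop := A ≠ []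
instance (A : List Int) (T : Int) : Decidable (Pre_coal A T) := by unfold Pre_coal; infer_instance
def pvWitness_coal : List Int × Int := ([3, 1, 4], 5)

def Spec_coal (A : List Int) (T : Int) (out : Int) : Prop := out = coal_alt A T
instance (A : List Int) (T : Int) (out : Int) : Decidable (Spec_coal A T out) := by unfold Spec_coal; infer_instance

-- ===== CLAIM (what is proved, stated in full; the proofs are below) =====
def Claim_equal_coal : Prop := ∀ (A : List Int) (T : Int), Dom_coal A T → Pre_coal A T → Spec_coal A T (coal A T)

-- ===== LEMMAS AND PROOFS =====

def toL : STree → List Int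
  | .leaf v => [v]
  | .node _ l r _ => toL l ++ toL r

def WF : STree → Prop
  | .leaf _ => True
  | .node m l r lk => WF l ∧ WF r ∧ m = max (maxOf l) (maxOf r) ∧ lk = (toL l).length

lemma maxOf_ge_iff : ∀ (t : STree), WF t → ∀ x : Int, (x ≤ maxOf t ↔ ∃ v ∈ toL t, x ≤ v) := by
  intro t
  induction t with
  | leaf v => intro _ x; simp [maxOf, toL]
  | node m l r lk ihl ihr =>
    intro hw x
    obtain ⟨hl, hr, hm, -⟩ := hw
    have hmn : maxOf (.node m l r lk) = m := rfl
    have htn : toL (.node m l r lk) = toL l ++ toL r := rfl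
    rw [hmn, htn, hm, le_max_iff, ihl hl x, ihr hr x]
    constructor
    · rintro (⟨v, hv, hx⟩ | ⟨v, hv, hx⟩) <;> exact ⟨v, by simp [hv], hx⟩
    · rintro ⟨v, hv, hx⟩
      rcases List.mem_append.mp hv with h | h
      · exact Or.inl ⟨v, h, hx⟩
      · exact Or.inr ⟨v, h, hx⟩

lemma ff_snd_ge (L : List Int) (x : Int) : -1 ≤ (firstFitA L x).2 := by
  induction L with
  | nil => simp [firstFitA]
  | cons m rest ih =>
    simp only [firstFitA]
    split_ifs with h h2
    · simp
    · simp
    · simp only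
      omega

lemma ff_len (L : List Int) (x : Int) : (firstFitA L x).1.length = L.length := by
  induction L with
  | nil => simp [firstFitA]
  | cons m rest ih =>
    simp only [firstFitA]
    split_ifs with h h2 <;> simp [ih]

lemma ff_fail_iff (L : List Int) (x : Int) : (firstFitA L x).2 = -1 ↔ ∀ v ∈ L, v < x := by
  induction L with
  | nil => simp [firstFitA]
  | cons m rest ih =>
    by_cases h : m ≥ x
    · simp only [firstFitA, if_pos h]
      refine iff_of_false (by simp) ?_
      intro hall
      exact absurd (hall m (by simp)) (by omega)
    · have hge := ff_snd_ge rest x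
      simp only [firstFitA, if_neg h]
      by_cases h2 : (firstFitA rest x).2 = -1
      · simp only [if_pos h2]
        constructor
        · intro _ v hv
          rcases List.mem_cons.mp hv with rfl | hv
          · omega
          · exact ih.mp h2 v hv
        · intro _
          trivial
      · simp only [if_neg h2]
        refine iff_of_false ?_ ?_
        · show ¬ ((firstFitA rest x).2 + 1 = -1)
          omega
        · intro hall
          exact h2 (ih.mpr fun v hv => hall v (by simp [hv]))

lemma ff_append_left (L R : List Int) (x : Int) (h : (firstFitA L x).2 ≠ -1) :
    firstFitA (L ++ R) x = ((firstFitA L x).1 ++ R, (firstFitA L x).2) := by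
  induction L with
  | nil => simp [firstFitA] at h
  | cons m rest ih =>
    by_cases hm : m ≥ x
    · simp [firstFitA, hm]
    · have hne : (firstFitA rest x).2 ≠ -1 := by
        intro h0
        exact h (by simp [firstFitA, hm, h0])
      simp only [List.cons_append, firstFitA, if_neg hm]
      rw [ih hne]

lemma ff_append_right (L R : List Int) (x : Int) (h : (firstFitA L x).2 = -1) :
    firstFitA (L ++ R) x =
      (L ++ (firstFitA R x).1, if (firstFitA R x).2 = -1 then -1 else (firstFitA R x).2 + (L.length : Int)) := by
  induction L with
  | nil =>
    simp only [List.nil_append, List.length_nil, Nat.cast_zero, add_zero]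
    split_ifs with h2
    · rw [← h2]
    · rfl
  | cons m rest ih =>
    have hall := (ff_fail_iff (m :: rest) x).mp h
    have hm : ¬ m ≥ x := by have := hall m (by simp); omega
    have hrest : (firstFitA rest x).2 = -1 := (ff_fail_iff rest x).mpr fun v hv => hall v (by simp [hv])
    have hge := ff_snd_ge R x
    simp only [List.cons_append, firstFitA, if_neg hm]
    rw [ih hrest]
    by_cases h2 : (firstFitA R x).2 = -1
    · simp [h2]
    · have hcond : ¬ ((firstFitA R x).2 + (rest.length : Int) = -1) := by omega
      rw [if_neg h2, if_neg hcond]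
      have hL : (((m :: rest).length : Nat) : Int) = (rest.length : Int) + 1 := by
        push_cast [List.length_cons]
        ring
      rw [hL, ← add_assoc, if_neg h2]

lemma alloc_spec : ∀ (t : STree) (x : Int), WF t →
    (allocT t x).1 = (firstFitA (toL t) x).2 ∧
    toL (allocT t x).2 = (firstFitA (toL t) x).1 ∧
    WF (allocT t x).2 := by
  intro t
  induction t with
  | leaf v =>
    intro x _
    simp only [allocT, toL, firstFitA]
    split_ifs with h
    · simp [toL, WF]
    · simp [toL, WF]
  | node m l r lk ihl ihr =>
    intro x hw
    obtain ⟨hl, hr, hm, hlk⟩ := hw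
    by_cases hmax : maxOf l ≥ x
    · have hex : ∃ v ∈ toL l, x ≤ v := (maxOf_ge_iff l hl x).mp hmax
      have hne : (firstFitA (toL l) x).2 ≠ -1 := by
        intro h0
        obtain ⟨v, hv, hx⟩ := hex
        exact absurd ((ff_fail_iff (toL l) x).mp h0 v hv) (by omega)
      obtain ⟨ih1, ih2, ih3⟩ := ihl x hl
      have htn : toL (.node m l r lk) = toL l ++ toL r := rfl
      rw [htn, ff_append_left (toL l) (toL r) x hne]
      simp only [allocT, if_pos hmax]
      refine ⟨ih1, by simp [toL, ih2], ?_⟩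
      exact ⟨ih3, hr, rfl, by rw [ih2, ff_len, hlk]⟩
    · have hfail : (firstFitA (toL l) x).2 = -1 := by
        apply (ff_fail_iff (toL l) x).mpr
        intro v hv
        have : v ≤ maxOf l := (maxOf_ge_iff l hl v).mpr ⟨v, hv, le_refl v⟩
        omega
      obtain ⟨ih1, ih2, ih3⟩ := ihr x hr
      have htn : toL (.node m l r lk) = toL l ++ toL r := rfl
      rw [htn, ff_append_right (toL l) (toL r) x hfail]
      simp only [allocT, if_neg hmax]
      refine ⟨by rw [ih1, hlk], by simp [toL, ih2], ?_⟩
      exact ⟨hl, ih3, rfl, hlk⟩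

lemma toL_build (T : Int) : ∀ k, k ≠ 0 → toL (buildT T k) = List.replicate k T := by
  intro k
  induction k using Nat.strong_induction_on with
  | _ k ih =>
    match k with
    | 0 => intro h; exact absurd rfl h
    | 1 => intro _; simp [buildT, toL]
    | (k+2) =>
      intro _
      rw [buildT]
      show toL (buildT T ((k+2)/2)) ++ toL (buildT T (k+2-(k+2)/2)) = List.replicate (k+2) T
      rw [ih ((k+2)/2) (by omega) (by omega), ih (k+2-(k+2)/2) (by omega) (by omega), ← List.replicate_add]
      congr 1
      omega

lemma WF_build (T : Int) : ∀ k, WF (buildT T k) := by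
  intro k
  induction k using Nat.strong_induction_on with
  | _ k ih =>
    match k with
    | 0 => simp [buildT, WF]
    | 1 => simp [buildT, WF]
    | (k+2) =>
      rw [buildT]
      refine ⟨ih ((k+2)/2) (by omega), ih (k+2-(k+2)/2) (by omega), rfl, ?_⟩
      rw [toL_build T ((k+2)/2) (by omega)]
      simp

lemma foldA_acc : ∀ (xs : List Int) (mags acc : List Int),
    List.foldl stepA (mags, acc) xs =
      ((List.foldl stepA (mags, []) xs).1, acc ++ (List.foldl stepA (mags, []) xs).2) := by
  intro xs
  induction xs with
  | nil => simp
  | cons x xs ih =>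
    intro mags acc
    simp only [List.foldl_cons]
    rw [ih (stepA (mags, acc) x).1 (stepA (mags, acc) x).2]
    rw [ih (stepA (mags, []) x).1 (stepA (mags, []) x).2]
    simp [stepA]

lemma getLastD_cons' (a d : Int) (l : List Int) : (a :: l).getLastD d = l.getLastD a := by
  cases l <;> simp [List.getLastD]

lemma main_inv : ∀ (xs : List Int) (t : STree) (jB : Int), WF t →
    (List.foldl stepB (jB, t) xs).1 = ((List.foldl stepA (toL t, []) xs).2).getLastD jB := by
  intro xs
  induction xs with
  | nil => intro t jB _; simp
  | cons x xs ih =>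
    intro t jB hw
    obtain ⟨h1, h2, h3⟩ := alloc_spec t x hw
    simp only [List.foldl_cons]
    have hstepB : stepB (jB, t) x = ((allocT t x).1, (allocT t x).2) := rfl
    have hstepA : stepA (toL t, []) x = (toL (allocT t x).2, [(allocT t x).1]) := by
      simp [stepA, h1, h2]
    rw [hstepB, hstepA, ih _ _ h3, foldA_acc xs (toL (allocT t x).2) [(allocT t x).1]]
    rw [List.singleton_append, getLastD_cons']

lemma foldA_len : ∀ (xs mags acc : List Int),
    (List.foldl stepA (mags, acc) xs).2.length = acc.length + xs.length := by
  intro xs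
  induction xs with
  | nil => simp
  | cons x xs ih =>
    intro mags acc
    simp only [List.foldl_cons]
    rw [ih]
    simp [stepA]
    omega

-- ===== VERDICT (by name: the statement is the Claim_ definition above) =====
theorem coal_spec : Claim_equal_coal := by
  intro A T _ hpre
  unfold Spec_coal
  have hmain := main_inv A (buildT T A.length) (-1) (WF_build T A.length)
  rw [toL_build T A.length (fun h => hpre (List.length_eq_zero_iff.mp h))] at hmain
  have hcoal : coal A T = (PySem.List.pyGet? ((List.foldl stepA (List.replicate A.length T, []) A).2) (-1)).getD 0 := rfl
  have halt : coal_alt A T = (List.foldl stepB (-1, buildT T A.length) A).1 := rfl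
  rw [hcoal, halt, hmain]
  set idx := (List.foldl stepA (List.replicate A.length T, []) A).2 with hidx
  have hlen : idx.length = A.length := by rw [hidx, foldA_len]; simp
  have hne : idx ≠ [] := by
    intro h0
    apply hpre
    rw [h0] at hlen
    exact List.length_eq_zero_iff.mp hlen.symm
  rw [PySem.List.pyGet?_neg_one, List.getLastD_eq_getLast?]
  obtain ⟨y, hy⟩ := Option.isSome_iff_exists.mp (List.getLast?_isSome.mpr hne)
  rw [hy]
  rfl
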